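-- pv_equiv track=rewrite | github.com/TheWeiHu/illumio_challenge | submission.py | binary_search_ip
-- ===== SOURCE A (Python) =====
-- def binary_search_ip(accepted_addresses, address):
--     """
--     Determines whether the given ip address is within one of the accepted intervals.
--     """
--     left = 0
--     right = len(accepted_addresses)
--     while left < right:
--         mid = (left + right) // 2
--         current_address = accepted_addresses[mid]
--         if current_address[0] > address:
--             right = mid
--         elif current_address[1] < address:
--             left = mid + 1
--         else:
--             return True
--     return False
-- ===== SOURCE B (Python) =====
-- def binary_search_ip(accepted_addresses, address):
--     """
--     Determines whether the given ip address is within one of the accepted intervals.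
--     Recursive divide-and-conquer on list halves (probes the same elements as the
--     iterative index-based search).
--     """
--     if not accepted_addresses:
--         return False
--     mid = len(accepted_addresses) // 2
--     low, high = accepted_addresses[mid]
--     if low > address:
--         return binary_search_ip(accepted_addresses[:mid], address)
--     if high < address:
--         return binary_search_ip(accepted_addresses[mid + 1:], address)
--     return True
-- ===== Notes on version B (the rewrite author's own statement) =====
-- stated objective: alternative
-- what changed: Replaced the iterative two-index (left/right) while-loop with a recursive divide-and-conquer that probes the middle element and recurses on a slice of the list (prefix or suffix), eliminating the index bookkeeping; it probes the same element sequence, so the result is identical even on unsorted input.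
import Mathlib
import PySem

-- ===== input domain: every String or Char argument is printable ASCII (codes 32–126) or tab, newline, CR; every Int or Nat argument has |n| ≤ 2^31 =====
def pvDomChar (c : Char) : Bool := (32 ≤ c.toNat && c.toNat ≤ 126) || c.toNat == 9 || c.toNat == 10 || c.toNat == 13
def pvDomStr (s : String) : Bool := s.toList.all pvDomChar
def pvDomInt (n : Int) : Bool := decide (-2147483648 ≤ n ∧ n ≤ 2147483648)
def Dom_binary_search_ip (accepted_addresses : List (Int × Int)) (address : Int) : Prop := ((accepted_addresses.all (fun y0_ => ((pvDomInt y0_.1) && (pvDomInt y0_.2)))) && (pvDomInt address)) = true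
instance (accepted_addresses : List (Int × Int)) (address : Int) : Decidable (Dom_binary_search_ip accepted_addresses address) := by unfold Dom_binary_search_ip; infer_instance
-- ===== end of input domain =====

-- B replaces the index-pair while-loop by a recursion on list halves (same probe sequence); objective: alternative decomposition, not faster.

-- ===== PORT A =====
-- the while-loop of A, state (left, right); terminates because right - left shrinks
def binary_search_ip_loop (xs : List (Int × Int)) (address : Int) (left right : Int) : Bool :=
  if h : left < right then
    let mid := PySem.Int.floordiv (left + right) 2
    match PySem.List.pyGet? xs mid with
    | none => false   -- IndexError; unreachable for A's calls (0 ≤ left, right ≤ len)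
    | some cur =>
      if cur.1 > address then
        binary_search_ip_loop xs address left mid
      else if cur.2 < address then
        binary_search_ip_loop xs address (mid + 1) right
      else true
  else false
termination_by (right - left).toNat
decreasing_by
  · have := PySem.Int.floordiv_two_mid_bounds (le_of_lt h)
    have h2 : PySem.Int.floordiv (left + right) 2 = (left + right) / 2 :=
      PySem.Int.floordiv_eq_ediv_of_pos (by omega)
    omega
  · have := PySem.Int.floordiv_two_mid_bounds (le_of_lt h)
    have h2 : PySem.Int.floordiv (left + right) 2 = (left + right) / 2 :=
      PySem.Int.floordiv_eq_ediv_of_pos (by omega)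
    omega

def binary_search_ip (accepted_addresses : List (Int × Int)) (address : Int) : Bool :=
  binary_search_ip_loop accepted_addresses address 0 (accepted_addresses.length : Int)

-- ===== PORT B =====
def binary_search_ip_alt (accepted_addresses : List (Int × Int)) (address : Int) : Bool :=
  if h : accepted_addresses = [] then false
  else
    let mid : Int := PySem.Int.floordiv (accepted_addresses.length : Int) 2
    match hg : PySem.List.pyGet? accepted_addresses mid with
    | none => false   -- unreachable: 0 ≤ mid < length
    | some (low, high) =>
      if low > address then
        binary_search_ip_alt (PySem.List.slice accepted_addresses none (some mid)) address
      else if high < address then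
        binary_search_ip_alt (PySem.List.slice accepted_addresses (some (mid + 1)) none) address
      else true
termination_by accepted_addresses.length
decreasing_by
  · have hm : PySem.Int.floordiv (accepted_addresses.length : Int) 2 = ((accepted_addresses.length / 2 : Nat) : Int) := by
      exact_mod_cast PySem.Int.floordiv_natCast accepted_addresses.length 2
    have hlen : 0 < accepted_addresses.length := List.length_pos_iff.mpr h
    rw [hm, PySem.List.slice_to_natCast]
    simp
    omega
  · have hm : PySem.Int.floordiv (accepted_addresses.length : Int) 2 = ((accepted_addresses.length / 2 : Nat) : Int) := by
      exact_mod_cast PySem.Int.floordiv_natCast accepted_addresses.length 2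
    have hlen : 0 < accepted_addresses.length := List.length_pos_iff.mpr h
    have hc : ((accepted_addresses.length / 2 : Nat) : Int) + 1 = ((accepted_addresses.length / 2 + 1 : Nat) : Int) := by push_cast; ring
    rw [hm, hc, PySem.List.slice_from_natCast]
    simp
    omega

-- ===== PRECONDITION & SPEC =====
def Spec_binary_search_ip (accepted_addresses : List (Int × Int)) (address : Int) (out : Bool) : Prop := out = binary_search_ip_alt accepted_addresses address
instance (accepted_addresses : List (Int × Int)) (address : Int) (out : Bool) : Decidable (Spec_binary_search_ip accepted_addresses address out) := by unfold Spec_binary_search_ip; infer_instance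

-- ===== CLAIM (what is proved, stated in full; the proofs are below) =====
def Claim_equal_binary_search_ip : Prop := ∀ (accepted_addresses : List (Int × Int)) (address : Int), Dom_binary_search_ip accepted_addresses address → Spec_binary_search_ip accepted_addresses address (binary_search_ip accepted_addresses address)

-- ===== LEMMAS AND PROOFS =====

theorem alt_step (xs : List (Int × Int)) (address : Int) (h : xs ≠ []) (low high : Int)
    (hget : PySem.List.pyGet? xs (PySem.Int.floordiv ((xs.length : Nat) : Int) 2) = some (low, high)) :
    binary_search_ip_alt xs address =
      if low > address then
        binary_search_ip_alt (PySem.List.slice xs none (some (PySem.Int.floordiv ((xs.length : Nat) : Int) 2))) address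
      else if high < address then
        binary_search_ip_alt (PySem.List.slice xs (some (PySem.Int.floordiv ((xs.length : Nat) : Int) 2 + 1)) none) address
      else true := by
  rw [binary_search_ip_alt]
  simp only [dif_neg h]
  split
  · next hg => rw [hget] at hg; cases hg
  · next l2 h2 hg =>
    rw [hget] at hg
    injection hg with hp
    injection hp with e1 e2
    subst e1 e2
    rfl

theorem loop_eq_alt (n : Nat) : ∀ (xs : List (Int × Int)) (address : Int) (l r : Nat),
    r ≤ xs.length → r - l = n →
    binary_search_ip_loop xs address (l : Int) (r : Int) =
      binary_search_ip_alt ((xs.drop l).take (r - l)) address := by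
  induction n using Nat.strong_induction_on with
  | _ n ih =>
    intro xs address l r hr hn
    by_cases hlr : l < r
    · -- the sublist inspected this round
      set m : Nat := (l + r) / 2 with hmdef
      have hm1 : l ≤ m := by omega
      have hm2 : m < r := by omega
      have hmlen : m < xs.length := by omega
      have hmidA : PySem.Int.floordiv ((l : Int) + (r : Int)) 2 = ((m : Nat) : Int) := by
        have : ((l : Int) + (r : Int)) = ((l + r : Nat) : Int) := by push_cast; ring
        rw [this]
        exact_mod_cast PySem.Int.floordiv_natCast (l + r) 2
      have hgetA : PySem.List.pyGet? xs ((m : Nat) : Int) = some xs[m] := by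
        simp [List.getElem?_eq_getElem hmlen]
      -- the B-side sublist
      have hsublen : ((xs.drop l).take (r - l)).length = r - l := by
        simp; omega
      have hsubne : (xs.drop l).take (r - l) ≠ [] := by
        intro hempty
        rw [hempty] at hsublen; simp at hsublen; omega
      have hmidB : PySem.Int.floordiv ((((xs.drop l).take (r - l)).length : Nat) : Int) 2 =
          (((r - l) / 2 : Nat) : Int) := by
        rw [hsublen]
        exact_mod_cast PySem.Int.floordiv_natCast (r - l) 2
      have hidx : (r - l) / 2 = m - l := by omega
      have hgetB : PySem.List.pyGet? ((xs.drop l).take (r - l)) (((r - l) / 2 : Nat) : Int)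
          = some xs[m] := by
        rw [PySem.List.pyGet?_natCast]
        rw [List.getElem?_take_of_lt (by omega), List.getElem?_drop, hidx]
        have : l + (m - l) = m := by omega
        rw [this, List.getElem?_eq_getElem hmlen]
      -- left recursive slice
      have hsliceL : PySem.List.slice ((xs.drop l).take (r - l)) none (some (((r - l) / 2 : Nat) : Int))
          = (xs.drop l).take (m - l) := by
        rw [PySem.List.slice_to_natCast, List.take_take, hidx]
        congr 1
        omega
      -- right recursive slice
      have hsliceR : PySem.List.slice ((xs.drop l).take (r - l)) (some ((((r - l) / 2 : Nat) : Int) + 1)) none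
          = (xs.drop (m + 1)).take (r - (m + 1)) := by
        have hc : ((((r - l) / 2 : Nat) : Int) + 1) = (((r - l) / 2 + 1 : Nat) : Int) := by
          push_cast; ring
        rw [hc, PySem.List.slice_from_natCast, List.drop_take]
        have h1 : l + ((r - l) / 2 + 1) = m + 1 := by omega
        have h2 : r - l - ((r - l) / 2 + 1) = r - (m + 1) := by omega
        rw [List.drop_drop, h1, h2]
      rw [binary_search_ip_loop]
      have hlrI : ((l : Int) < (r : Int)) := by exact_mod_cast hlr
      simp only [hlrI, dif_pos]
      rw [hmidA, hgetA]
      dsimp only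
      rw [alt_step ((xs.drop l).take (r - l)) address hsubne xs[m].1 xs[m].2
            (by rw [hmidB]; simpa using hgetB)]
      rw [hmidB, hsliceL, hsliceR]
      by_cases h1 : xs[m].1 > address
      · simp only [h1, if_pos]
        exact ih (m - l) (by omega) xs address l m (by omega) rfl
      · by_cases h2 : xs[m].2 < address
        · simp only [h1, h2, if_neg, if_pos, not_false_iff]
          have hcast : ((m : Nat) : Int) + 1 = (((m + 1 : Nat)) : Int) := by push_cast; ring
          rw [hcast]
          exact ih (r - (m + 1)) (by omega) xs address (m + 1) r (by omega) rfl
        · simp [h1, h2]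
    · -- l ≥ r : loop exits, sublist is empty
      have h0 : r - l = 0 := by omega
      have hI : ¬ ((l : Int) < (r : Int)) := by exact_mod_cast hlr
      rw [binary_search_ip_loop, binary_search_ip_alt]
      simp [hI, h0]

-- ===== VERDICT (by name: the statement is the Claim_ definition above) =====
theorem binary_search_ip_spec : Claim_equal_binary_search_ip := by
  intro xs address _
  unfold Spec_binary_search_ip binary_search_ip
  have := loop_eq_alt xs.length xs address 0 xs.length le_rfl rfl
  simpa using this
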